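-- pv_equiv track=rewrite | github.com/cemrifki/sentiment-recnn-rnn-ensemble-IARM | dependency/treehopper/dep_parser_lexicon.py | get_match_w_max_len
-- ===== SOURCE A (Python) =====
-- def get_match_w_max_len(sorted_asps, gold_asp_w_ind):
--     """
--     Finds the aspect subtree with the maximum length that matches the gold aspect.
--     """
--
--     max_len = -1
--     asp_tree_max = []
--     for sorted_asp in sorted_asps:
--         l = find_sub_list(gold_asp_w_ind, sorted_asp)
--         len_ = len(sorted_asp)
--         if l and len_ > max_len:
--             max_len = len_
--             asp_tree_max = sorted_asp
--     if max_len > 0: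
--         return asp_tree_max
--     return sorted_asps[0]
--
-- def find_sub_list(sl, l):
--     """
--     Finds all occurrences of a sublist in a list and returns their start and end indices.
--     """
--     results = []
--     sll = len(sl)
--     if not sll: return results
--     for ind in (i for i,e in enumerate(l) if e==sl[0]):
--         if l[ind:ind+sll] == sl:
--             results.append((ind, ind+sll))
--
--     return results
-- ===== SOURCE B (Python) =====
-- def get_match_w_max_len(sorted_asps, gold_asp_w_ind):
--     """Sort candidates by length descending (stable) and return the first
--     one that contains the gold aspect contiguously; else the first candidate."""
--     if gold_asp_w_ind:
--         for asp in sorted(sorted_asps, key=len, reverse=True):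
--             if _contains(asp, gold_asp_w_ind):
--                 return asp
--     return sorted_asps[0]
--
-- def _contains(l, g):
--     """Scan start offsets right-to-left; g occurs in l iff it starts at one."""
--     i = len(l) - len(g)
--     while i >= 0:
--         if _starts_at(l, i, g):
--             return True
--         i -= 1
--     return False
--
-- def _starts_at(l, i, g):
--     return all(l[i + j] == g[j] for j in range(len(g)))
-- ===== Notes on version B (the rewrite author's own statement) =====
-- stated objective: alternative
-- what changed: A fuses a running (max_len, best) loop with a helper that collects all occurrence index pairs via slice comparisons; B stably sorts the candidates by length descending and returns the first one containing the gold aspect (stopping there), with containment tested by a right-to-left offset scan and a pointwise all() prefix check instead of slicing.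
-- outside the precondition, e.g. on get_match_w_max_len([], [1]): A raises IndexError, B raises IndexError
import Mathlib
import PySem

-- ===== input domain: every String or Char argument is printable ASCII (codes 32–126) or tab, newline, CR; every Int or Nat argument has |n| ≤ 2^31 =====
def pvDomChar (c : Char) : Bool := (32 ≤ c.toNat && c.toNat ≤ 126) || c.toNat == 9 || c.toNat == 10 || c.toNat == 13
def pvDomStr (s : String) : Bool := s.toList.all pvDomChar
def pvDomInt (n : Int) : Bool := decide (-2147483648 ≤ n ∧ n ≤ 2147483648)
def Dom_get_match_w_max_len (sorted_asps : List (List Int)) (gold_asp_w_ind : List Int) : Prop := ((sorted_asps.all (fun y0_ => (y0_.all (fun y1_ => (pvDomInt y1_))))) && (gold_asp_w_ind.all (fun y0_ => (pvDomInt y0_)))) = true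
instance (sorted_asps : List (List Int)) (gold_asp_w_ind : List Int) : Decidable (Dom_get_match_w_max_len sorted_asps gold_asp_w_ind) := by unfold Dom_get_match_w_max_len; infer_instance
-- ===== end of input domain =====

-- B replaces A's fused running-max loop with its find-all-occurrence-indices helper by a
-- stable length-descending sort followed by first-match, containment tested by a
-- right-to-left offset scan with a pointwise prefix check instead of slicing.

-- ===== PORT A =====
-- find_sub_list: the generator filter 'e == sl[0]' and the inner 'if' are one conjoined
-- condition; under the 'sll ≠ 0' guard, sl[0] is exactly sl.headI.
def find_sub_list (sl l : List Int) : List (Int × Int) :=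
  let sll : Int := (sl.length : Int)
  if sl.length = 0 then [] else
    (PySem.List.enumerate l).foldl
      (fun results p =>
        if p.2 = sl.headI ∧ PySem.List.slice l (some p.1) (some (p.1 + sll)) = sl
        then results ++ [(p.1, p.1 + sll)] else results) []

def get_match_w_max_len (sorted_asps : List (List Int)) (gold_asp_w_ind : List Int) : List Int :=
  let st := sorted_asps.foldl
    (fun (st : Int × List Int) sorted_asp =>
      if find_sub_list gold_asp_w_ind sorted_asp ≠ [] ∧ ((sorted_asp.length : Int)) > st.1
      then (((sorted_asp.length : Int)), sorted_asp) else st)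
    (-1, [])
  -- sorted_asps[0] raises IndexError on the empty list; Pre_ excludes it
  if st.1 > 0 then st.2 else (PySem.List.pyGet? sorted_asps 0).getD []

-- ===== PORT B =====
def starts_at (l : List Int) (i : Int) (g : List Int) : Bool :=
  -- all(l[i + j] == g[j] for j in range(len(g))); callers keep i + j in range
  (PySem.List.pyRange 0 (g.length : Int) 1).all
    (fun j => PySem.List.pyGetD l (i + j) 0 == PySem.List.pyGetD g j 0)

def contains_from (l g : List Int) (i : Int) : Bool :=
  if h : 0 ≤ i then
    if starts_at l i g then true else contains_from l g (i - 1)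
  else false
termination_by (i + 1).toNat
decreasing_by omega

def contains_run (l g : List Int) : Bool :=
  contains_from l g ((l.length : Int) - (g.length : Int))

def get_match_w_max_len_alt (sorted_asps : List (List Int)) (gold_asp_w_ind : List Int) : List Int :=
  if gold_asp_w_ind ≠ [] then
    match (PySem.List.sorted sorted_asps (fun a => (a.length : Int)) true).find?
        (fun a => contains_run a gold_asp_w_ind) with
    | some a => a
    | none => (PySem.List.pyGet? sorted_asps 0).getD []
  else (PySem.List.pyGet? sorted_asps 0).getD []

-- ===== PRECONDITION & SPEC =====
-- Pre_ excludes only sorted_asps = [], on which the Python A raises IndexError (sorted_asps[0]).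
def Pre_get_match_w_max_len (sorted_asps : List (List Int)) (gold_asp_w_ind : List Int) : Prop := sorted_asps ≠ []
instance (sorted_asps : List (List Int)) (gold_asp_w_ind : List Int) : Decidable (Pre_get_match_w_max_len sorted_asps gold_asp_w_ind) := by unfold Pre_get_match_w_max_len; infer_instance
def pvWitness_get_match_w_max_len : List (List Int) × List Int := ([[1, 2, 3], [2, 3]], [2, 3])

def Spec_get_match_w_max_len (sorted_asps : List (List Int)) (gold_asp_w_ind : List Int) (out : List Int) : Prop := out = get_match_w_max_len_alt sorted_asps gold_asp_w_ind
instance (sorted_asps : List (List Int)) (gold_asp_w_ind : List Int) (out : List Int) : Decidable (Spec_get_match_w_max_len sorted_asps gold_asp_w_ind out) := by unfold Spec_get_match_w_max_len; infer_instance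

-- ===== CLAIM =====
def Claim_equal_get_match_w_max_len : Prop := ∀ (sorted_asps : List (List Int)) (gold_asp_w_ind : List Int), Dom_get_match_w_max_len sorted_asps gold_asp_w_ind → Pre_get_match_w_max_len sorted_asps gold_asp_w_ind → Spec_get_match_w_max_len sorted_asps gold_asp_w_ind (get_match_w_max_len sorted_asps gold_asp_w_ind)

-- ===== LEMMAS AND PROOFS =====

-- an occurrence of gold inside a candidate, as A's helper tests it
def OccAt (a g : List Int) : Prop :=
  ∃ i : Int, 0 ≤ i ∧ PySem.List.slice a (some i) (some (i + (g.length : Int))) = g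

lemma occAt_take_drop (a g : List Int) {i : Int} (h0 : 0 ≤ i)
    (hs : PySem.List.slice a (some i) (some (i + (g.length : Int))) = g) :
    (a.drop i.toNat).take g.length = g := by
  rw [PySem.List.slice_toNat (ha := h0) (hb := by omega)] at hs
  have he : ((i + (g.length : Int)).toNat - i.toNat) = g.length := by omega
  rwa [he] at hs

lemma occAt_bound (a g : List Int) (hg : g ≠ []) {i : Int}
    (h0 : 0 ≤ i) (hs : PySem.List.slice a (some i) (some (i + (g.length : Int))) = g) :
    i + (g.length : Int) ≤ (a.length : Int) := by
  have h := congrArg List.length (occAt_take_drop a g h0 hs)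
  simp only [List.length_take, List.length_drop] at h
  have h2 : 0 < g.length := List.length_pos_of_ne_nil hg
  omega

lemma occAt_lt (a g : List Int) (hg : g ≠ []) {i : Int}
    (h0 : 0 ≤ i) (hs : PySem.List.slice a (some i) (some (i + (g.length : Int))) = g) :
    i < (a.length : Int) := by
  have h1 := occAt_bound a g hg h0 hs
  have h2 : 0 < g.length := List.length_pos_of_ne_nil hg
  omega

lemma occAt_head (a g : List Int) (hg : g ≠ []) {i : Int}
    (h0 : 0 ≤ i) (hs : PySem.List.slice a (some i) (some (i + (g.length : Int))) = g)
    (hlt : i.toNat < a.length) :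
    a[i.toNat]'hlt = g.headI := by
  have htd := occAt_take_drop a g h0 hs
  obtain ⟨c, t, rfl⟩ := List.exists_cons_of_ne_nil hg
  rcases hd : a.drop i.toNat with _ | ⟨x, rest⟩
  · rw [hd] at htd; simp at htd
  · rw [hd] at htd
    simp only [List.length_cons, List.take_succ_cons, List.cons.injEq] at htd
    have hx : a[i.toNat]'hlt = x := by
      have h1 : (List.drop i.toNat a)[0]'(by rw [hd]; simp) = x := by simp [hd]
      rw [List.getElem_drop] at h1
      simpa using h1
    simp [hx, htd.1]

lemma find_sub_list_ne_iff (a g : List Int) (hg : g ≠ []) :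
    find_sub_list g a ≠ [] ↔ OccAt a g := by
  unfold find_sub_list
  rw [if_neg (by simpa using hg)]
  have h := PySem.List.foldl_append_if
    (fun p : Int × Int => decide (p.2 = g.headI ∧ PySem.List.slice a (some p.1) (some (p.1 + (g.length : Int))) = g))
    (fun p : Int × Int => (p.1, p.1 + (g.length : Int))) (PySem.List.enumerate a) []
  simp only [decide_eq_true_eq] at h
  rw [h]
  simp only [ne_eq, List.nil_append, List.map_eq_nil_iff, List.filter_eq_nil_iff, not_forall,
    decide_eq_true_eq]
  constructor
  · rintro ⟨p, hp, hcond⟩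
    rw [PySem.List.mem_enumerate_iff] at hp
    obtain ⟨k, hk, rfl⟩ := hp
    rw [not_not] at hcond
    exact ⟨(k : Int), by positivity, by simpa using hcond.2⟩
  · rintro ⟨i, h0, hs⟩
    have hlt := occAt_lt a g hg h0 hs
    have hltn : i.toNat < a.length := by omega
    refine ⟨(i, a[i.toNat]'hltn), ?_, ?_⟩
    · rw [PySem.List.mem_enumerate_iff]
      exact ⟨i.toNat, hltn, by simp [Int.toNat_of_nonneg h0]⟩
    · rw [not_not]
      exact ⟨occAt_head a g hg h0 hs hltn, hs⟩

lemma starts_at_iff (l g : List Int) (i : Int) (h0 : 0 ≤ i)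
    (hb : i + (g.length : Int) ≤ (l.length : Int)) :
    starts_at l i g = true ↔ (l.drop i.toNat).take g.length = g := by
  unfold starts_at
  rw [List.all_eq_true]
  constructor
  · intro h
    apply List.ext_getElem
    · simp; omega
    · intro j hj1 hj2
      have hj : j < g.length := by simpa using hj2
      have hmem : (j : Int) ∈ PySem.List.pyRange 0 (g.length : Int) 1 := by
        rw [PySem.List.mem_pyRange_one]; constructor <;> [positivity; exact_mod_cast hj]
      have hx := h (j : Int) hmem
      rw [PySem.List.pyGetD_of_nonneg l 0 (by positivity),
          PySem.List.pyGetD_of_nonneg g 0 (by positivity)] at hx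
      simp only [beq_iff_eq] at hx
      have he1 : ((i + (j : Int)).toNat) = i.toNat + j := by omega
      have he2 : (((j : Int)).toNat) = j := by omega
      rw [he1, he2] at hx
      rw [List.getD_eq_getElem l 0 (by omega), List.getD_eq_getElem g 0 hj] at hx
      simp only [List.getElem_take, List.getElem_drop]
      exact hx
  · intro h j hjmem
    rw [PySem.List.mem_pyRange_one] at hjmem
    rw [PySem.List.pyGetD_of_nonneg l 0 (by omega),
        PySem.List.pyGetD_of_nonneg g 0 hjmem.1]
    simp only [beq_iff_eq]
    have hjl : j.toNat < g.length := by omega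
    have hil : i.toNat + j.toNat < l.length := by omega
    have he1 : ((i + j).toNat) = i.toNat + j.toNat := by omega
    rw [he1, List.getD_eq_getElem l 0 hil, List.getD_eq_getElem g 0 hjl]
    have h2 : ((l.drop i.toNat).take g.length)[j.toNat]'(by simp; omega) = g[j.toNat] := by
      simp [h]
    simp only [List.getElem_take, List.getElem_drop] at h2
    exact h2

lemma contains_from_iff (l g : List Int) :
    ∀ (n : Nat) (i : Int), i < (n : Int) →
      (contains_from l g i = true ↔ ∃ k : Int, 0 ≤ k ∧ k ≤ i ∧ starts_at l k g = true) := by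
  intro n
  induction n with
  | zero =>
    intro i hi
    rw [contains_from, dif_neg (by omega)]
    constructor
    · intro h; simp at h
    · rintro ⟨k, hk0, hki, -⟩; omega
  | succ n ih =>
    intro i hi
    by_cases hlt : i < (n : Int)
    · exact ih i hlt
    · have hi0 : 0 ≤ i := by omega
      rw [contains_from, dif_pos hi0]
      by_cases hs : starts_at l i g = true
      · simp only [hs, if_true]
        simp only [true_iff]
        exact ⟨i, hi0, le_refl i, hs⟩
      · rw [if_neg hs, ih (i - 1) (by omega)]
        constructor
        · rintro ⟨k, hk0, hki, hks⟩; exact ⟨k, hk0, by omega, hks⟩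
        · rintro ⟨k, hk0, hki, hks⟩
          refine ⟨k, hk0, ?_, hks⟩
          rcases eq_or_lt_of_le hki with rfl | h
          · exact absurd hks hs
          · omega

lemma contains_run_iff (l g : List Int) (hg : g ≠ []) :
    contains_run l g = true ↔ OccAt l g := by
  unfold contains_run
  rw [contains_from_iff l g (l.length + 1) _ (by push_cast; omega)]
  constructor
  · rintro ⟨k, hk0, hki, hks⟩
    have hb : k + (g.length : Int) ≤ (l.length : Int) := by omega
    refine ⟨k, hk0, ?_⟩
    rw [PySem.List.slice_toNat (ha := hk0) (hb := by omega)]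
    have he : ((k + (g.length : Int)).toNat - k.toNat) = g.length := by omega
    rw [he]
    exact (starts_at_iff l g k hk0 hb).mp hks
  · rintro ⟨i, h0, hs⟩
    have hb := occAt_bound l g hg h0 hs
    exact ⟨i, h0, by omega, (starts_at_iff l g i h0 hb).mpr (occAt_take_drop l g h0 hs)⟩

-- A's containment test agrees with B's (nonempty gold)
lemma test_agree (a g : List Int) (hg : g ≠ []) :
    (find_sub_list g a ≠ []) ↔ contains_run a g = true := by
  rw [find_sub_list_ne_iff a g hg, contains_run_iff a g hg]

-- structural unfoldings of PySem.List.insertBy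
lemma insertBy_nil (before : List Int → List Int → Bool) (x : List Int) :
    PySem.List.insertBy before x [] = [x] := by
  simp [PySem.List.insertBy]

lemma insertBy_cons (before : List Int → List Int → Bool) (x y : List Int) (ys : List (List Int)) :
    PySem.List.insertBy before x (y :: ys) =
      if before x y then x :: y :: ys else y :: PySem.List.insertBy before x ys := by
  by_cases h : before x y <;> simp [PySem.List.insertBy, h]

-- inserting an element that fails the test does not change the first match
lemma find?_insertBy_of_neg (P : List Int → Bool) (before : List Int → List Int → Bool)
    (x : List Int) (acc : List (List Int)) (hx : P x = false) :
    (PySem.List.insertBy before x acc).find? P = acc.find? P := by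
  induction acc with
  | nil => simp [insertBy_nil, hx]
  | cons y ys ih =>
    rw [insertBy_cons]
    by_cases h : before x y
    · rw [if_pos h, List.find?_cons_of_neg (by simp [hx])]
    · rw [if_neg h]
      by_cases hy : P y = true
      · rw [List.find?_cons_of_pos hy, List.find?_cons_of_pos hy]
      · rw [List.find?_cons_of_neg (by simpa using hy), List.find?_cons_of_neg (by simpa using hy), ih]

-- inserting a P-element strictly longer than every P-element makes it the first match
lemma find?_insertBy_of_gt (P : List Int → Bool) (x : List Int) (acc : List (List Int))
    (hx : P x = true)
    (hall : ∀ y ∈ acc, P y = true → (y.length : Int) < (x.length : Int)) :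
    (PySem.List.insertBy (fun a b => decide ((b.length : Int) < (a.length : Int))) x acc).find? P
      = some x := by
  induction acc with
  | nil => simp [insertBy_nil, hx]
  | cons y ys ih =>
    rw [insertBy_cons]
    by_cases h : (decide ((y.length : Int) < (x.length : Int)) : Bool) = true
    · rw [if_pos h, List.find?_cons_of_pos hx]
    · rw [if_neg (by simpa using h)]
      have hy : P y = false := by
        by_contra hy'
        have := hall y (by simp) (by simpa using hy')
        simp at h
        omega
      rw [List.find?_cons_of_neg (by simp [hy])]
      exact ih (fun z hz => hall z (by simp [hz]))

-- inserting a no-longer element behind a descending-sorted list keeps the first match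
lemma find?_insertBy_of_le (P : List Int → Bool) (x m : List Int) (acc : List (List Int))
    (hpw : acc.Pairwise (fun a b => (b.length : Int) ≤ (a.length : Int)))
    (hfind : acc.find? P = some m) (hle : (x.length : Int) ≤ (m.length : Int)) :
    (PySem.List.insertBy (fun a b => decide ((b.length : Int) < (a.length : Int))) x acc).find? P
      = some m := by
  induction acc with
  | nil => simp at hfind
  | cons y ys ih =>
    rw [List.pairwise_cons] at hpw
    rw [insertBy_cons]
    by_cases hy : P y = true
    · have hm : m = y := by rw [List.find?_cons_of_pos hy] at hfind; exact (Option.some.injEq _ _ ▸ hfind).symm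
      subst hm
      rw [if_neg (by simp; omega)]
      rw [List.find?_cons_of_pos hy]
    · rw [List.find?_cons_of_neg (by simpa using hy)] at hfind
      have hmem : m ∈ ys := List.mem_of_find?_eq_some hfind
      have hmy : (m.length : Int) ≤ (y.length : Int) := hpw.1 m hmem
      rw [if_neg (by simp; omega)]
      rw [List.find?_cons_of_neg (by simpa using hy)]
      exact ih hpw.2 hfind

-- insertion into a length-descending list stays length-descending
lemma insertBy_pairwise (x : List Int) (acc : List (List Int))
    (hpw : acc.Pairwise (fun a b => (b.length : Int) ≤ (a.length : Int))) :
    (PySem.List.insertBy (fun a b => decide ((b.length : Int) < (a.length : Int))) x acc).Pairwise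
      (fun a b => (b.length : Int) ≤ (a.length : Int)) := by
  induction acc with
  | nil => simp [insertBy_nil]
  | cons y ys ih =>
    rw [List.pairwise_cons] at hpw
    rw [insertBy_cons]
    by_cases h : (decide ((y.length : Int) < (x.length : Int)) : Bool) = true
    · rw [if_pos h]
      simp only [decide_eq_true_eq] at h
      refine List.Pairwise.cons ?_ (List.Pairwise.cons hpw.1 hpw.2)
      intro z hz
      rcases List.mem_cons.mp hz with rfl | hz'
      · omega
      · have := hpw.1 z hz'; omega
    · rw [if_neg (by simpa using h)]
      simp only [decide_eq_true_eq, not_lt] at h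
      refine List.Pairwise.cons ?_ (ih hpw.2)
      intro z hz
      rcases (PySem.List.mem_insertBy _ x z ys).mp hz with rfl | hz'
      · exact h
      · exact hpw.1 z hz'

-- the simultaneous invariant: A's running (max_len, best) state against the first match
-- in the insertion-built stable length-descending list
lemma main_inv (P : List Int → Bool) (asps : List (List Int))
    (st : Int × List Int) (acc : List (List Int))
    (hpw : acc.Pairwise (fun a b => (b.length : Int) ≤ (a.length : Int)))
    (hrel : (st = (-1, []) ∧ ∀ y ∈ acc, P y = false) ∨
            (∃ m, st = ((m.length : Int), m) ∧ acc.find? P = some m ∧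
              ∀ y ∈ acc, P y = true → (y.length : Int) ≤ (m.length : Int))) :
    (let out := asps.foldl
      (fun (st : Int × List Int) a =>
        if P a = true ∧ (a.length : Int) > st.1 then ((a.length : Int), a) else st) st
    let acc' := asps.foldl
      (fun acc x => PySem.List.insertBy (fun a b => decide ((b.length : Int) < (a.length : Int))) x acc) acc
    (out = (-1, []) ∧ ∀ y ∈ acc', P y = false) ∨
      (∃ m, out = ((m.length : Int), m) ∧ acc'.find? P = some m ∧
        ∀ y ∈ acc', P y = true → (y.length : Int) ≤ (m.length : Int))) := by
  induction asps generalizing st acc with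
  | nil => exact hrel
  | cons x rest ih =>
    simp only [List.foldl_cons]
    apply ih
    · exact insertBy_pairwise x acc hpw
    by_cases hx : P x = true
    · rcases hrel with ⟨hst, hall⟩ | ⟨m, hst, hfind, hbound⟩
      · subst hst
        right
        refine ⟨x, ?_, ?_, ?_⟩
        · have h0 : (0 : Int) ≤ ((x.length : Int)) := Int.natCast_nonneg _
          have : ((x.length : Int)) > (-1 : Int) := by omega
          simp [hx, this]
        · exact find?_insertBy_of_gt P x acc hx (fun y hy hPy => by rw [hall y hy] at hPy; simp at hPy)
        · intro y hy hPy
          rcases (PySem.List.mem_insertBy _ x y acc).mp hy with rfl | hy'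
          · omega
          · rw [hall y hy'] at hPy; simp at hPy
      · subst hst
        by_cases hgt : (x.length : Int) > (m.length : Int)
        · right
          refine ⟨x, by simp [hx, hgt], ?_, ?_⟩
          · exact find?_insertBy_of_gt P x acc hx (fun y hy hPy => lt_of_le_of_lt (hbound y hy hPy) hgt)
          · intro y hy hPy
            rcases (PySem.List.mem_insertBy _ x y acc).mp hy with rfl | hy'
            · omega
            · have := hbound y hy' hPy; omega
        · right
          refine ⟨m, by simp [hgt], ?_, ?_⟩
          · exact find?_insertBy_of_le P x m acc hpw hfind (by omega)
          · intro y hy hPy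
            rcases (PySem.List.mem_insertBy _ x y acc).mp hy with rfl | hy'
            · omega
            · exact hbound y hy' hPy
    · have hx' : P x = false := by simpa using hx
      rcases hrel with ⟨hst, hall⟩ | ⟨m, hst, hfind, hbound⟩
      · subst hst
        left
        refine ⟨by simp [hx'], ?_⟩
        intro y hy
        rcases (PySem.List.mem_insertBy _ x y acc).mp hy with rfl | hy'
        · exact hx'
        · exact hall y hy'
      · subst hst
        right
        refine ⟨m, by simp [hx'], ?_, ?_⟩
        · rw [find?_insertBy_of_neg P _ x acc hx', hfind]
        · intro y hy hPy
          rcases (PySem.List.mem_insertBy _ x y acc).mp hy with rfl | hy'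
          · rw [hx'] at hPy; simp at hPy
          · exact hbound y hy' hPy

-- ===== VERDICT =====
theorem get_match_w_max_len_spec : Claim_equal_get_match_w_max_len := by
  intro asps g _hdom _hpre
  unfold Spec_get_match_w_max_len get_match_w_max_len get_match_w_max_len_alt
  by_cases hg : g = []
  · subst hg
    have hfold : asps.foldl
        (fun (st : Int × List Int) a =>
          if find_sub_list [] a ≠ [] ∧ ((a.length : Int)) > st.1 then (((a.length : Int)), a) else st)
        (-1, []) = (-1, []) := by
      induction asps with
      | nil => rfl
      | cons a t ih => simp [find_sub_list]
    simp only [hfold]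
    norm_num
  · rw [if_pos hg]
    -- rewrite A's test into B's
    have hfun : (fun (st : Int × List Int) a =>
        if find_sub_list g a ≠ [] ∧ ((a.length : Int)) > st.1 then (((a.length : Int)), a) else st)
        = (fun (st : Int × List Int) a =>
        if contains_run a g = true ∧ ((a.length : Int)) > st.1 then (((a.length : Int)), a) else st) := by
      funext st a
      by_cases hc : contains_run a g = true
      · simp [hc, (test_agree a g hg)]
      · simp [hc, (test_agree a g hg)]
    rw [hfun]
    rw [PySem.List.sorted_rev_eq_foldl_insertBy asps (fun a => (a.length : Int))]
    have h := main_inv (fun a => contains_run a g) asps (-1, []) [] (by simp)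
      (Or.inl ⟨rfl, by simp⟩)
    simp only at h
    rcases h with ⟨hout, hall⟩ | ⟨m, hout, hfind, _⟩
    · rw [hout, List.find?_eq_none.mpr (fun y hy => by simp [hall y hy])]
      norm_num
    · rw [hout, hfind]
      have hPm : contains_run m g = true := by
        have := List.find?_some hfind; simpa using this
      obtain ⟨i, h0, hs⟩ := (contains_run_iff m g hg).mp hPm
      have hb := occAt_bound m g hg h0 hs
      have hglen : 0 < g.length := List.length_pos_of_ne_nil hg
      have : ((m.length : Int)) > 0 := by push_cast at hb ⊢; omega
      rw [if_pos this]
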